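-- pv_equiv track=rewrite | github.com/rkdalsdn94/algoalgo | solved_ac/Silver_1/민겸_수_21314.py | min_res
-- ===== SOURCE A (Python) =====
-- def min_res(num):
--     res = []
--     m_cnt = 0
--
--     for i in range(len(num)):
--         if num[i] == 'M':
--             m_cnt += 1
--         elif num[i] == 'K':
--             if m_cnt > 0:
--                 res.append('1' + '0' * (m_cnt - 1) + '5')
--             else:
--                 res.append('5')
--             m_cnt = 0
--
--     if m_cnt > 0:
--         res.append('1' + '0' * (m_cnt - 1))
--
--     return ''.join(res)
-- ===== SOURCE B (Python) =====
-- def min_res(num):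
--     parts = num.split('K')
--     body = ['1' + '0' * (p.count('M') - 1) + '5' if p.count('M') > 0 else '5'
--             for p in parts[:-1]]
--     m = parts[-1].count('M')
--     tail = ['1' + '0' * (m - 1)] if m > 0 else []
--     return ''.join(body + tail)
-- ===== Notes on version B (the rewrite author's own statement) =====
-- stated objective: faster
-- what changed: B splits the input on 'K' up front and emits one token per K-delimited part (counting its 'M's), replacing A's char-by-char Python scan with a running M-counter flushed at each 'K'; the per-character work moves into the C-implemented str.split and str.count.
import Mathlib
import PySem

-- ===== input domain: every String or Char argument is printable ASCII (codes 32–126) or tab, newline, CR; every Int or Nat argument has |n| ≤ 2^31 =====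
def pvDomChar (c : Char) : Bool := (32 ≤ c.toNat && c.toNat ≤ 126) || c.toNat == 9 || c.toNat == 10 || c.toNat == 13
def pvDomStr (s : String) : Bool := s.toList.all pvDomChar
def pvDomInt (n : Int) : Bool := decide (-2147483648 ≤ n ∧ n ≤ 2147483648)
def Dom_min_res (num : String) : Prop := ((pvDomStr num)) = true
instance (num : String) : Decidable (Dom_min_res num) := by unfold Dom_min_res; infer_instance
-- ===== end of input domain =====

-- B rebuilds the answer from num.split('K'): one token per K-delimited part (counting its 'M's),
-- instead of A's single char-by-char scan with an M-counter flushed at each 'K'. Objective: alternative decomposition.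


-- ===== PORT A =====
-- char-by-char scan: count Ms, flush a token at each 'K', final token for leftover Ms
def min_res (num : String) : String :=
  let st := num.toList.foldl (fun (st : List String × Nat) c =>
    if c = 'M' then (st.1, st.2 + 1)
    else if c = 'K' then
      (st.1 ++ [if st.2 > 0 then "1" ++ String.ofList (List.replicate (st.2 - 1) '0') ++ "5" else "5"], 0)
    else st) ([], 0)
  let res := if st.2 > 0 then st.1 ++ ["1" ++ String.ofList (List.replicate (st.2 - 1) '0')] else st.1
  PySem.Str.join "" res

-- ===== PORT B =====
-- split on 'K' first, then one token per part; num.split('K') is never empty, so the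
-- .getD fallbacks for parts[:-1]/parts[-1] are unreachable
def min_res_alt (num : String) : String :=
  let parts : List String := (PySem.Str.split? num "K").getD []
  let body : List String := (PySem.List.slice parts none (some (-1))).map (fun p =>
    if PySem.Str.count p "M" > 0 then
      "1" ++ String.ofList (List.replicate (PySem.Str.count p "M" - 1) '0') ++ "5"
    else "5")
  let m := PySem.Str.count ((PySem.List.pyGet? parts (-1)).getD "") "M"
  let tail := if m > 0 then ["1" ++ String.ofList (List.replicate (m - 1) '0')] else []
  PySem.Str.join "" (body ++ tail)

-- ===== PRECONDITION & SPEC =====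
def Spec_min_res (num : String) (out : String) : Prop := out = min_res_alt num
instance (num : String) (out : String) : Decidable (Spec_min_res num out) := by unfold Spec_min_res; infer_instance

-- ===== CLAIM (what is proved, stated in full; the proofs are below) =====
def Claim_equal_min_res : Prop := ∀ (num : String), Dom_min_res num → Spec_min_res num (min_res num)

-- ===== LEMMAS AND PROOFS =====

-- the K-token for a group with m Ms
def strTok5 (m : Nat) : String :=
  if m > 0 then "1" ++ String.ofList (List.replicate (m - 1) '0') ++ "5" else "5"
-- the final token for m leftover Ms
def strTokL (m : Nat) : String := "1" ++ String.ofList (List.replicate (m - 1) '0')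

-- reference splitter on 'K'
def splitK : List Char → List (List Char)
  | [] => [[]]
  | c :: rest => if c = 'K' then [] :: splitK rest else (splitK rest).modifyHead (c :: ·)

-- B's token list, with m extra Ms credited to the first group
def outB : Nat → List (List Char) → List String
  | _, [] => []
  | m, [p] => if m + p.count 'M' > 0 then [strTokL (m + p.count 'M')] else []
  | m, p :: q :: ps => strTok5 (m + p.count 'M') :: outB 0 (q :: ps)

theorem splitK_ne_nil (l : List Char) : splitK l ≠ [] := by
  cases l with
  | nil => simp [splitK]
  | cons c rest =>
    simp only [splitK]
    split
    · simp
    · cases h : splitK rest with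
      | nil => exact absurd h (splitK_ne_nil rest)
      | cons a t => simp [List.modifyHead]

theorem splitOn_go_eq (fuel : Nat) (l cur : List Char) (acc : List (List Char))
    (h : l.length ≤ fuel) :
    PySem.Chars.splitOn.go ['K'] fuel l cur acc
      = acc.reverse ++ (splitK l).modifyHead (cur.reverse ++ ·) := by
  induction fuel generalizing l cur acc with
  | zero =>
    have : l = [] := by cases l <;> simp_all
    subst this
    simp [PySem.Chars.splitOn.go, splitK, List.modifyHead]
  | succ fuel ih =>
    cases l with
    | nil => simp [PySem.Chars.splitOn.go, splitK, List.modifyHead]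
    | cons c rest =>
      simp only [List.length_cons, Nat.succ_le_succ_iff] at h
      by_cases hc : c = 'K'
      · subst hc
        rw [show PySem.Chars.splitOn.go ['K'] (fuel+1) ('K' :: rest) cur acc
              = PySem.Chars.splitOn.go ['K'] fuel rest [] (cur.reverse :: acc) by
            simp [PySem.Chars.splitOn.go, List.isPrefixOf]]
        rw [ih rest [] (cur.reverse :: acc) h]
        cases hs : splitK rest with
        | nil => exact absurd hs (splitK_ne_nil rest)
        | cons a t => simp [splitK, List.modifyHead, hs]
      · rw [show PySem.Chars.splitOn.go ['K'] (fuel+1) (c :: rest) cur acc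
              = PySem.Chars.splitOn.go ['K'] fuel rest (c :: cur) acc by
            simp only [PySem.Chars.splitOn.go, List.isPrefixOf]
            simp
            intro h'; exact absurd h'.symm hc]
        rw [ih rest (c :: cur) acc h]
        cases hs : splitK rest with
        | nil => exact absurd hs (splitK_ne_nil rest)
        | cons a t => simp [splitK, hc, List.modifyHead, hs]

theorem splitOn_eq_splitK (l : List Char) : PySem.Chars.splitOn l ['K'] = splitK l := by
  rw [PySem.Chars.splitOn, splitOn_go_eq (l.length + 1) l [] [] (by omega)]
  cases hs : splitK l with
  | nil => exact absurd hs (splitK_ne_nil l)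
  | cons a t => simp [List.modifyHead]

theorem count_go_M (fuel : Nat) (l : List Char) (acc : Nat) (h : l.length ≤ fuel) :
    PySem.Chars.count.go ['M'] fuel l acc = acc + l.count 'M' := by
  induction fuel generalizing l acc with
  | zero =>
    have : l = [] := by cases l <;> simp_all
    subst this; simp [PySem.Chars.count.go]
  | succ fuel ih =>
    cases l with
    | nil => simp [PySem.Chars.count.go]
    | cons c rest =>
      simp only [List.length_cons, Nat.succ_le_succ_iff] at h
      by_cases hc : c = 'M'
      · subst hc
        rw [show PySem.Chars.count.go ['M'] (fuel+1) ('M' :: rest) acc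
              = PySem.Chars.count.go ['M'] fuel rest (acc + 1) by
            simp [PySem.Chars.count.go, List.isPrefixOf]]
        rw [ih rest (acc + 1) h]
        simp; omega
      · rw [show PySem.Chars.count.go ['M'] (fuel+1) (c :: rest) acc
              = PySem.Chars.count.go ['M'] fuel rest acc by
            simp only [PySem.Chars.count.go, List.isPrefixOf]
            simp
            intro h'; exact absurd h'.symm hc]
        rw [ih rest acc h]
        simp [hc]

theorem countM_eq (p : List Char) : PySem.Chars.count p ['M'] = p.count 'M' := by
  rw [PySem.Chars.count]
  simp [count_go_M p.length p 0 (le_refl _)]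

-- the step function of A's fold
def stepA (st : List String × Nat) (c : Char) : List String × Nat :=
  if c = 'M' then (st.1, st.2 + 1)
  else if c = 'K' then (st.1 ++ [strTok5 st.2], 0)
  else st

theorem outB_modifyHead (m : Nat) (c : Char) (hc : c ≠ 'M') (ps : List (List Char)) (h : ps ≠ []) :
    outB m (ps.modifyHead (c :: ·)) = outB m ps := by
  match ps with
  | [p] => simp [List.modifyHead, outB, hc]
  | p :: q :: t => simp [List.modifyHead, outB, hc]

theorem outB_modifyHead_M (m : Nat) (ps : List (List Char)) (h : ps ≠ []) :
    outB m (ps.modifyHead ('M' :: ·)) = outB (m + 1) ps := by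
  match ps with
  | [p] =>
    simp only [List.modifyHead, outB, List.count_cons]
    have : m + (p.count 'M' + 1) = m + 1 + p.count 'M' := by omega
    simp [this]
  | p :: q :: t =>
    simp only [List.modifyHead, outB, List.count_cons]
    have : m + (p.count 'M' + 1) = m + 1 + p.count 'M' := by omega
    simp [this]

-- A's finishing step
def finishA (st : List String × Nat) : List String :=
  if st.2 > 0 then st.1 ++ [strTokL st.2] else st.1

theorem foldA_eq (cs : List Char) (res : List String) (m : Nat) :
    finishA (cs.foldl stepA (res, m)) = res ++ outB m (splitK cs) := by
  induction cs generalizing res m with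
  | nil =>
    simp only [List.foldl_nil, finishA, splitK, outB]
    by_cases hm : m > 0 <;> simp [hm, strTokL]
  | cons c rest ih =>
    by_cases hM : c = 'M'
    · subst hM
      rw [show (('M' :: rest).foldl stepA (res, m)) = rest.foldl stepA (res, m + 1) by
        simp [stepA]]
      rw [ih res (m + 1)]
      have := outB_modifyHead_M m (splitK rest) (splitK_ne_nil rest)
      simp [splitK, this]
    · by_cases hK : c = 'K'
      · subst hK
        rw [show (('K' :: rest).foldl stepA (res, m)) = rest.foldl stepA (res ++ [strTok5 m], 0) by
          simp [stepA]]
        rw [ih (res ++ [strTok5 m]) 0]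
        cases hs : splitK rest with
        | nil => exact absurd hs (splitK_ne_nil rest)
        | cons a t =>
          cases t with
          | nil => simp [splitK, hs, outB]
          | cons b t' => simp [splitK, hs, outB]
      · rw [show ((c :: rest).foldl stepA (res, m)) = rest.foldl stepA (res, m) by
          simp [stepA, hM, hK]]
        rw [ih res m]
        have := outB_modifyHead m c hM (splitK rest) (splitK_ne_nil rest)
        simp [splitK, hK, this]

-- B's list equals outB 0 on the split
theorem bList_eq (ps : List (List Char)) (h : ps ≠ []) :
    ((ps.map String.ofList).dropLast.map (fun p =>
      if PySem.Str.count p "M" > 0 then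
        "1" ++ String.ofList (List.replicate (PySem.Str.count p "M" - 1) '0') ++ "5"
      else "5"))
    ++ (if PySem.Str.count ((ps.map String.ofList).getLast (by simpa using h)) "M" > 0 then
          ["1" ++ String.ofList (List.replicate
            (PySem.Str.count ((ps.map String.ofList).getLast (by simpa using h)) "M" - 1) '0')]
        else [])
      = outB 0 ps := by
  match ps with
  | [p] => simp [outB, strTokL, countM_eq, List.count_pos_iff]
  | p :: q :: t =>
    have ih := bList_eq (q :: t) (by simp)
    simp only [List.map_cons, List.dropLast_cons₂, List.getLast_cons_cons] at *
    rw [List.cons_append, ih]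
    simp [outB, strTok5, countM_eq, List.count_pos_iff]

theorem slice_neg_one {α : Type} (l : List α) :
    PySem.List.slice l none (some (-1)) = l.dropLast := by
  simp [PySem.List.slice, List.dropLast_eq_take]

-- ===== VERDICT (by name: the statement is the Claim_ definition above) =====
theorem min_res_spec : Claim_equal_min_res := by
  intro num _
  unfold Spec_min_res
  have hstep : (fun (st : List String × Nat) c =>
      if c = 'M' then (st.1, st.2 + 1)
      else if c = 'K' then
        (st.1 ++ [if st.2 > 0 then "1" ++ String.ofList (List.replicate (st.2 - 1) '0') ++ "5" else "5"], 0)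
      else st) = stepA := by
    funext st c; simp [stepA, strTok5]
  have hsplit : PySem.Str.split? num "K" = some ((splitK num.toList).map String.ofList) := by
    have hk : ("K" : String).toList = ['K'] := by decide
    simp [PySem.Str.split?, PySem.Chars.split?, hk, splitOn_eq_splitK]
  have hne : (splitK num.toList).map String.ofList ≠ [] := by
    simpa using splitK_ne_nil num.toList
  have hfin : ∀ st : List String × Nat,
      (if st.2 > 0 then st.1 ++ ["1" ++ String.ofList (List.replicate (st.2 - 1) '0')] else st.1)
        = finishA st := by
    intro st; simp [finishA, strTokL]
  have hlast : (List.map String.ofList (splitK num.toList)).getLast?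
      = some ((List.map String.ofList (splitK num.toList)).getLast hne) :=
    List.getLast?_eq_some_getLast hne
  simp only [min_res, min_res_alt, hstep, hsplit, Option.getD_some, slice_neg_one,
    PySem.List.pyGet?_neg_one, hlast, hfin]
  rw [foldA_eq, List.nil_append, ← bList_eq (splitK num.toList) (splitK_ne_nil _)]
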